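-- pv_equiv track=rewrite | github.com/YangdongONE/TF-LaC_2024 | classifier.py | get_cause_span
-- ===== SOURCE A (Python) =====
-- def get_cause_span(label_list):
--   span_c = []
--   for i in range(len(label_list)):
--     if label_list[i] == 1:
--       start = i
--       end = i
--       while end+1<len(label_list) and label_list[end+1] == 2:
--         end += 1
--       span_c.append((start-1,end-1)) #减一是因为文本中不包含[CLS]，而标签中填充了[CLS]那一位
--   return span_c
-- ===== SOURCE B (Python) =====
-- def get_cause_span(label_list):
--     # single backward pass: carry r = farthest index reachable through the
--     # run of 2's starting just after i; emit spans in reverse, then flip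
--     spans = []
--     r = 0
--     nxt = None
--     for i in range(len(label_list) - 1, -1, -1):
--         if nxt != 2:
--             r = i
--         if label_list[i] == 1:
--             spans.append((i - 1, r - 1))
--         nxt = label_list[i]
--     spans.reverse()
--     return spans
-- ===== Notes on version B (the rewrite author's own statement) =====
-- stated objective: alternative
-- what changed: Replaced the forward scan with a nested while rescanning each 2-run per 1-label by a single backward pass that carries the farthest reachable index of the current 2-run and emits each span once; avoids A's worst-case quadratic rescans but is not measurably faster on random inputs.
import Mathlib
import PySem

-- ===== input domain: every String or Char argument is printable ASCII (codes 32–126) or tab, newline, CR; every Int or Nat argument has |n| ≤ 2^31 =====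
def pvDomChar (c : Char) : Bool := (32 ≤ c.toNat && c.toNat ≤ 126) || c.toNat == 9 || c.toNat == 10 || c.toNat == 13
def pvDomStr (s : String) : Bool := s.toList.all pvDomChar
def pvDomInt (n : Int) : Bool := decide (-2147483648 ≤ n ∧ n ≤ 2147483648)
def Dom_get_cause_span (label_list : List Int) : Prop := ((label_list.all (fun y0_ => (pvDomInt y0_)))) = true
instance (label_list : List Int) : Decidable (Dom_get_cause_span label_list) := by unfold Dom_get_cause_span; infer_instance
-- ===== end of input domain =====

-- B replaces A's forward scan with inner 2-run rescans by one backward pass over the list (alternative decomposition).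

-- ===== PORT A =====
-- the inner 'while end+1 < len and label_list[end+1] == 2: end += 1' loop; fuel = list length bounds it
def aWhile (l : List Int) : Nat → Int → Int
  | 0, e => e
  | fuel + 1, e =>
    if e + 1 < (l.length : Int) ∧ PySem.List.pyGet? l (e + 1) = some 2 then
      aWhile l fuel (e + 1)
    else e

def get_cause_span (label_list : List Int) : List (Int × Int) :=
  (PySem.List.pyRange 0 label_list.length 1).foldl
    (fun span_c i =>
      if PySem.List.pyGet? label_list i = some 1 then
        span_c ++ [(i - 1, aWhile label_list label_list.length i - 1)]
      else span_c)
    []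

-- ===== PORT B =====
-- backward pass of Source B as structural recursion: processing position i after all
-- later positions; first component = r (reach of the 2-run after i), second = spans
def altGo (i : Int) : List Int → Int × List (Int × Int)
  | [] => (i, [])
  | x :: rest =>
    let p := altGo (i + 1) rest
    let r : Int :=
      match rest with
      | [] => i
      | y :: _ => if y = 2 then p.1 else i
    (r, if x = 1 then (i - 1, r - 1) :: p.2 else p.2)

def get_cause_span_alt (label_list : List Int) : List (Int × Int) :=
  (altGo 0 label_list).2

-- ===== PRECONDITION & SPEC =====
def Spec_get_cause_span (label_list : List Int) (out : List (Int × Int)) : Prop := out = get_cause_span_alt label_list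
instance (label_list : List Int) (out : List (Int × Int)) : Decidable (Spec_get_cause_span label_list out) := by unfold Spec_get_cause_span; infer_instance

-- ===== CLAIM (what is proved, stated in full; the proofs are below) =====
def Claim_equal_get_cause_span : Prop := ∀ (label_list : List Int), Dom_get_cause_span label_list → Spec_get_cause_span label_list (get_cause_span label_list)

-- ===== LEMMAS AND PROOFS =====

-- length of the leading run of 2's
def run2 : List Int → Int
  | [] => 0
  | y :: ys => if y = 2 then 1 + run2 ys else 0

theorem altGo_fst (xs : List Int) : ∀ (i : Int), (altGo i xs).1 = i + run2 xs.tail := by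
  induction xs with
  | nil => intro i; simp [altGo, run2]
  | cons x rest ih =>
    intro i
    cases rest with
    | nil => simp [altGo, run2]
    | cons y t =>
      have h := ih (i + 1)
      simp only [List.tail_cons] at h
      have hunf : (altGo i (x :: y :: t)).1 = if y = 2 then (altGo (i + 1) (y :: t)).1 else i := rfl
      rw [hunf, h]
      by_cases hy : y = 2
      · rw [if_pos hy]
        simp only [List.tail_cons, run2, if_pos hy]
        ring
      · rw [if_neg hy]
        simp [run2, hy]

theorem aWhile_spec (l : List Int) (fuel e : Nat) (he : e < l.length)
    (hf : l.length - e ≤ fuel) :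
    aWhile l fuel (e : Int) = (e : Int) + run2 (l.drop (e + 1)) := by
  induction fuel generalizing e with
  | zero => omega
  | succ fuel ih =>
    have hcast : ((e : Int) + 1) = ((e + 1 : Nat) : Int) := by push_cast; ring
    by_cases hlt : e + 1 < l.length
    · have hdrop : l.drop (e + 1) = l[e + 1] :: l.drop (e + 2) := by
        rw [List.drop_eq_getElem_cons hlt]
      by_cases h2 : l[e + 1] = 2
      · have hstep : aWhile l (fuel + 1) (e : Int) = aWhile l fuel ((e + 1 : Nat) : Int) := by
          simp only [aWhile]
          rw [if_pos, hcast]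
          refine ⟨by omega, ?_⟩
          rw [hcast, PySem.List.pyGet?_natCast, List.getElem?_eq_getElem hlt, h2]
        rw [hstep, ih (e + 1) hlt (by omega), hdrop]
        simp only [run2, if_pos h2]
        push_cast; ring
      · have hstep : aWhile l (fuel + 1) (e : Int) = e := by
          simp only [aWhile]
          rw [if_neg]
          intro hc
          rw [hcast, PySem.List.pyGet?_natCast, List.getElem?_eq_getElem hlt] at hc
          exact h2 (by injection hc.2)
        rw [hstep, hdrop]
        simp [run2, h2]
    · have hdrop : l.drop (e + 1) = [] := List.drop_eq_nil_of_le (by omega)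
      have hstep : aWhile l (fuel + 1) (e : Int) = e := by
        simp only [aWhile]
        rw [if_neg]
        intro hc
        have h1 : (e : Int) + 1 < (l.length : Int) := hc.1
        omega
      rw [hstep, hdrop]
      simp [run2]

theorem main_foldl (suf : List Int) : ∀ (pre : List Int) (acc : List (Int × Int)),
    (PySem.List.pyRange (pre.length) ((pre ++ suf).length) 1).foldl
      (fun span_c i =>
        if PySem.List.pyGet? (pre ++ suf) i = some 1 then
          span_c ++ [(i - 1, aWhile (pre ++ suf) (pre ++ suf).length i - 1)]
        else span_c)
      acc
    = acc ++ (altGo (pre.length) suf).2 := by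
  induction suf with
  | nil =>
    intro pre acc
    rw [PySem.List.pyRange_one_eq_nil (by simp)]
    simp [altGo]
  | cons x rest ih =>
    intro pre acc
    have hre : pre ++ x :: rest = (pre ++ [x]) ++ rest := by simp
    have hlen : (pre.length : Int) < ((pre ++ x :: rest).length : Int) := by
      simp only [List.length_append, List.length_cons]
      push_cast; omega
    rw [PySem.List.pyRange_one_cons hlen, List.foldl_cons]
    have hget : PySem.List.pyGet? (pre ++ x :: rest) (pre.length) = some x :=
      PySem.List.pyGet?_append_length pre rest x
    have hd : (pre ++ x :: rest).drop (pre.length + 1) = rest := by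
      rw [hre]
      exact List.drop_left' (by simp)
    have hwhile : aWhile (pre ++ x :: rest) (pre ++ x :: rest).length ((pre.length : Nat) : Int)
        = (pre.length : Int) + run2 rest := by
      rw [aWhile_spec (pre ++ x :: rest) _ pre.length (by simp) (Nat.sub_le _ _), hd]
    rw [hre] at hwhile
    have hrange : PySem.List.pyRange ((pre.length : Int) + 1) ((pre ++ x :: rest).length) 1
        = PySem.List.pyRange (((pre ++ [x]).length : Nat) : Int) (((pre ++ [x]) ++ rest).length) 1 := by
      rw [← hre]
      congr 1
      simp
    have hlen1 : (((pre ++ [x]).length : Nat) : Int) = (pre.length : Int) + 1 := by simp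
    have hfst : (altGo (pre.length) (x :: rest)).1 = (pre.length : Int) + run2 rest := by
      rw [altGo_fst]; simp
    by_cases hx : x = 1
    · rw [if_pos (hget.trans (congrArg some hx)), hrange, hre, ih (pre ++ [x])]
      have hsnd : (altGo (pre.length) (x :: rest)).2
          = ((pre.length : Int) - 1, (altGo (pre.length) (x :: rest)).1 - 1)
              :: (altGo ((pre.length : Int) + 1) rest).2 := by
        simp only [altGo, if_pos hx]
      rw [hwhile, hlen1, hsnd, hfst]
      simp
    · rw [if_neg (fun h => hx (Option.some.inj (hget.symm.trans h))), hrange, hre,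
          ih (pre ++ [x]), hlen1]
      have hsnd : (altGo (pre.length) (x :: rest)).2 = (altGo ((pre.length : Int) + 1) rest).2 := by
        simp only [altGo, if_neg hx]
      rw [hsnd]

-- ===== VERDICT (by name: the statement is the Claim_ definition above) =====
theorem get_cause_span_spec : Claim_equal_get_cause_span := by
  intro l _
  unfold Spec_get_cause_span get_cause_span get_cause_span_alt
  have h := main_foldl l [] []
  simpa using h
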